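-- pv_equiv track=rewrite | github.com/r0cstar09/hermes-relay | llm_score_and_summarize.py | match_headline_to_article
-- ===== SOURCE A (Python) =====
-- def match_headline_to_article(headline, articles):
--     """Match a headline from LLM response to the original article to get the link."""
--     # Try exact match first
--     for article in articles:
--         if article["title"].strip() == headline.strip():
--             return article["link"]
--
--     # Try case-insensitive match
--     for article in articles:
--         if article["title"].strip().lower() == headline.strip().lower():
--             return article["link"]
--
--     # Try partial match (headline contains article title or vice versa)
--     for article in articles:
--         title_lower = article["title"].strip().lower()
--         headline_lower = headline.strip().lower()
--         if title_lower in headline_lower or headline_lower in title_lower: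
--             return article["link"]
--
--     return None
-- ===== SOURCE B (Python) =====
-- def match_headline_to_article(headline, articles):
--     """Match a headline from LLM response to the original article to get the link."""
--     hs = headline.strip()
--     hl = hs.lower()
--     first_exact = None
--     first_ci = None
--     first_partial = None
--     for article in articles:
--         t = article["title"].strip()
--         if t == hs:
--             first_exact = article
--             break
--         tl = t.lower()
--         if first_ci is None and tl == hl:
--             first_ci = article
--         if first_partial is None and (tl in hl or hl in tl):
--             first_partial = article
--     for cand in (first_exact, first_ci, first_partial):
--         if cand is not None:
--             return cand["link"]
--     return None
-- ===== Notes on version B (the rewrite author's own statement) =====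
-- stated objective: alternative
-- what changed: Replaces A's three sequential full scans (exact, then case-insensitive, then partial) by one traversal that breaks on the first exact match and otherwise records the first candidate article per tier, resolving tier priority after the loop with the stripped/lowered headline computed once.
import Mathlib
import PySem

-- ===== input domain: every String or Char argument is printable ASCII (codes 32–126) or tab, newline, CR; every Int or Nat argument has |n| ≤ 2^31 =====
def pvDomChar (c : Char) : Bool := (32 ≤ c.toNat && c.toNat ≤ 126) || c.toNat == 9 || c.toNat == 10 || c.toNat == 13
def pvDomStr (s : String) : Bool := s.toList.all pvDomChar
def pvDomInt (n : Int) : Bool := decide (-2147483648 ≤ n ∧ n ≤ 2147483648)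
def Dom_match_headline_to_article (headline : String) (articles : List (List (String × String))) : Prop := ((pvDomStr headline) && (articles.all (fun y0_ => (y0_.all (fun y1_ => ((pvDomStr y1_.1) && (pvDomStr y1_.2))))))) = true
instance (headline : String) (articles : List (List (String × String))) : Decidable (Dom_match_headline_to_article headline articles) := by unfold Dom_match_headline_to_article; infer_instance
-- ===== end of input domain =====

-- B replaces A's three sequential scans by one traversal that records the first candidate
-- article per tier (breaking early on an exact match) and resolves tier priority after the
-- loop (objective: alternative; same asymptotic cost).


-- shared small accessors: article["title"] / article["link"] as dict lookups
def pvT (a : List (String × String)) : Option String := (PySem.Dict.mk a).get? "title"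
def pvL (a : List (String × String)) : Option String := (PySem.Dict.mk a).get? "link"

-- ===== PORT A =====
-- first loop: exact match on stripped titles (a missing "title" is a Python KeyError,
-- modelled as none and excluded by Pre_)
def pvPassExact (headline : String) : List (List (String × String)) → Option String
  | [] => none
  | a :: rest =>
    match pvT a with
    | none => none
    | some t =>
      if PySem.Str.strip t == PySem.Str.strip headline then pvL a
      else pvPassExact headline rest

-- second loop: case-insensitive match
def pvPassCI (headline : String) : List (List (String × String)) → Option String
  | [] => none
  | a :: rest =>
    match pvT a with
    | none => none
    | some t =>
      if PySem.Str.lower (PySem.Str.strip t) == PySem.Str.lower (PySem.Str.strip headline) then pvL a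
      else pvPassCI headline rest

-- third loop: partial match (substring either way)
def pvPassPartial (headline : String) : List (List (String × String)) → Option String
  | [] => none
  | a :: rest =>
    match pvT a with
    | none => none
    | some t =>
      let titleLower := PySem.Str.lower (PySem.Str.strip t)
      let headlineLower := PySem.Str.lower (PySem.Str.strip headline)
      if PySem.Str.isIn titleLower headlineLower || PySem.Str.isIn headlineLower titleLower then pvL a
      else pvPassPartial headline rest

def match_headline_to_article (headline : String) (articles : List (List (String × String))) : Option String :=
  match pvPassExact headline articles with
  | some l => some l
  | none =>
    match pvPassCI headline articles with
    | some l => some l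
    | none => pvPassPartial headline articles

-- ===== PORT B =====
-- Source B's single loop: break on the first exact match, otherwise remember the first
-- case-insensitive and the first partial candidate ARTICLE (links are read only after the
-- loop, on the chosen candidate — exactly the key accesses the Python B performs)
def pvScanB (hs hl : String) :
    List (List (String × String)) →
    Option (List (String × String)) → Option (List (String × String)) →
    Option (List (String × String)) × Option (List (String × String)) × Option (List (String × String))
  | [], c, p => (none, c, p)
  | a :: rest, c, p =>
    let t := PySem.Str.strip ((pvT a).getD "")
    if t == hs then (some a, c, p)
    else
      let tl := PySem.Str.lower t
      let c' := if c.isNone && (tl == hl) then some a else c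
      let p' := if p.isNone && (PySem.Str.isIn tl hl || PySem.Str.isIn hl tl) then some a else p
      pvScanB hs hl rest c' p'

-- Source B's final loop over (first_exact, first_ci, first_partial): first non-None candidate's link
def match_headline_to_article_alt (headline : String) (articles : List (List (String × String))) : Option String :=
  let hs := PySem.Str.strip headline
  let hl := PySem.Str.lower hs
  let r := pvScanB hs hl articles none none
  match r.1 with
  | some a => pvL a
  | none =>
    match r.2.1 with
    | some a => pvL a
    | none =>
      match r.2.2 with
      | some a => pvL a
      | none => none

-- ===== PRECONDITION & SPEC =====
-- predicates on one article, written with the exact expressions the loops test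
def pvExb (hs : String) (a : List (String × String)) : Bool :=
  PySem.Str.strip ((pvT a).getD "") == hs
def pvCIb (hl : String) (a : List (String × String)) : Bool :=
  PySem.Str.lower (PySem.Str.strip ((pvT a).getD "")) == hl
def pvPartb (hl : String) (a : List (String × String)) : Bool :=
  PySem.Str.isIn (PySem.Str.lower (PySem.Str.strip ((pvT a).getD ""))) hl ||
    PySem.Str.isIn hl (PySem.Str.lower (PySem.Str.strip ((pvT a).getD "")))
-- an "event" of the first scan: an article missing "title" (KeyError) or an exact match (return)
def pvEv (hs : String) (a : List (String × String)) : Bool := !(pvT a).isSome || pvExb hs a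

-- Pre_ excludes EXACTLY the inputs on which the Python A raises KeyError (a missing "title"
-- reached before any exact match, or a missing "link" on the article whose link is returned);
-- the Python B raises on exactly the same inputs, and A and B return on all admitted inputs.
def Pre_match_headline_to_article (headline : String) (articles : List (List (String × String))) : Prop :=
  (match articles.find? (pvEv (PySem.Str.strip headline)) with
   | some a => (pvT a).isSome && (pvL a).isSome
   | none =>
     match articles.find? (pvCIb (PySem.Str.lower (PySem.Str.strip headline))) with
     | some a => (pvL a).isSome
     | none =>
       match articles.find? (pvPartb (PySem.Str.lower (PySem.Str.strip headline))) with
       | some a => (pvL a).isSome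
       | none => true) = true
instance (headline : String) (articles : List (List (String × String))) : Decidable (Pre_match_headline_to_article headline articles) := by unfold Pre_match_headline_to_article; infer_instance

def pvWitness_match_headline_to_article : String × (List (List (String × String))) :=
  ("Hello World ", [[("title", "hello world"), ("link", "http://a")], [("title", "Other"), ("link", "http://b")]])

def Spec_match_headline_to_article (headline : String) (articles : List (List (String × String))) (out : Option String) : Prop := out = match_headline_to_article_alt headline articles
instance (headline : String) (articles : List (List (String × String))) (out : Option String) : Decidable (Spec_match_headline_to_article headline articles out) := by unfold Spec_match_headline_to_article; infer_instance

-- ===== CLAIM (what is proved, stated in full; the proofs are below) =====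
def Claim_equal_match_headline_to_article : Prop := ∀ (headline : String) (articles : List (List (String × String))), Dom_match_headline_to_article headline articles → Pre_match_headline_to_article headline articles → Spec_match_headline_to_article headline articles (match_headline_to_article headline articles)

-- ===== LEMMAS AND PROOFS =====

theorem passExact_none (headline : String) (l : List (List (String × String)))
    (H : ∀ b ∈ l, pvEv (PySem.Str.strip headline) b = false) :
    pvPassExact headline l = none := by
  induction l with
  | nil => rfl
  | cons a rest ih =>
    have ha := H a (by simp)
    simp only [pvEv, pvExb, Bool.or_eq_false_iff, Bool.not_eq_false'] at ha
    obtain ⟨t, ht⟩ := Option.isSome_iff_exists.mp ha.1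
    have hne : (PySem.Str.strip t == PySem.Str.strip headline) = false := by
      have := ha.2; rw [ht] at this; simpa using this
    simp only [pvPassExact, ht, hne, Bool.false_eq_true, if_false]
    exact ih (fun b hb => H b (List.mem_cons_of_mem a hb))

theorem passExact_break (headline : String) (l1 l2 : List (List (String × String)))
    (a : List (String × String))
    (H1 : ∀ b ∈ l1, pvEv (PySem.Str.strip headline) b = false)
    (HT : (pvT a).isSome = true) (HE : pvExb (PySem.Str.strip headline) a = true) :
    pvPassExact headline (l1 ++ a :: l2) = pvL a := by
  induction l1 with
  | nil =>
    obtain ⟨t, ht⟩ := Option.isSome_iff_exists.mp HT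
    have heq : (PySem.Str.strip t == PySem.Str.strip headline) = true := by
      have := HE; unfold pvExb at this; rw [ht] at this; simpa using this
    simp [pvPassExact, ht, heq]
  | cons b rest ih =>
    have hb := H1 b (by simp)
    simp only [pvEv, pvExb, Bool.or_eq_false_iff, Bool.not_eq_false'] at hb
    obtain ⟨t, ht⟩ := Option.isSome_iff_exists.mp hb.1
    have hne : (PySem.Str.strip t == PySem.Str.strip headline) = false := by
      have := hb.2; rw [ht] at this; simpa using this
    simp only [List.cons_append, pvPassExact, ht, hne, Bool.false_eq_true, if_false]
    exact ih (fun x hx => H1 x (List.mem_cons_of_mem b hx))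

theorem scanB_break (hs hl : String) (l1 l2 : List (List (String × String)))
    (a : List (String × String)) (c p : Option (List (String × String)))
    (H1 : ∀ b ∈ l1, pvExb hs b = false) (HE : pvExb hs a = true) :
    (pvScanB hs hl (l1 ++ a :: l2) c p).1 = some a := by
  induction l1 generalizing c p with
  | nil =>
    have heq : (PySem.Str.strip ((pvT a).getD "") == hs) = true := HE
    simp [pvScanB, heq]
  | cons b rest ih =>
    have hne : (PySem.Str.strip ((pvT b).getD "") == hs) = false := H1 b (by simp)
    simp only [List.cons_append, pvScanB, hne, Bool.false_eq_true, if_false]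
    exact ih _ _ (fun x hx => H1 x (List.mem_cons_of_mem b hx))

theorem scanB_no_exact (hs hl : String) (l : List (List (String × String)))
    (c p : Option (List (String × String)))
    (H : ∀ b ∈ l, pvExb hs b = false) :
    pvScanB hs hl l c p = (none, c.or (l.find? (pvCIb hl)), p.or (l.find? (pvPartb hl))) := by
  induction l generalizing c p with
  | nil => cases c <;> cases p <;> simp [pvScanB]
  | cons a rest ih =>
    have hne : (PySem.Str.strip ((pvT a).getD "") == hs) = false := H a (by simp)
    simp only [pvScanB, hne, Bool.false_eq_true, if_false]
    rw [ih _ _ (fun x hx => H x (List.mem_cons_of_mem a hx))]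
    refine Prod.ext rfl (Prod.ext ?_ ?_) <;> simp only []
    · cases c with
      | some v => simp only [Option.isNone_some, Bool.false_and, Bool.false_eq_true, if_false, Option.some_or]
      | none =>
        cases hci : pvCIb hl a with
        | true =>
          have h2 : (PySem.Str.lower (PySem.Str.strip ((pvT a).getD "")) == hl) = true := hci
          simp only [Option.isNone_none, Bool.true_and, h2, if_true, Option.some_or,
            List.find?_cons, hci, Option.none_or]
        | false =>
          have h2 : (PySem.Str.lower (PySem.Str.strip ((pvT a).getD "")) == hl) = false := hci
          simp only [Option.isNone_none, Bool.true_and, h2, Bool.false_eq_true, if_false,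
            List.find?_cons, hci]
    · cases p with
      | some v => simp only [Option.isNone_some, Bool.false_and, Bool.false_eq_true, if_false, Option.some_or]
      | none =>
        cases hpa : pvPartb hl a with
        | true =>
          have h2 : (PySem.Str.isIn (PySem.Str.lower (PySem.Str.strip ((pvT a).getD ""))) hl ||
              PySem.Str.isIn hl (PySem.Str.lower (PySem.Str.strip ((pvT a).getD "")))) = true := hpa
          simp only [Option.isNone_none, Bool.true_and, h2, if_true, Option.some_or,
            List.find?_cons, hpa, Option.none_or]
        | false =>
          have h2 : (PySem.Str.isIn (PySem.Str.lower (PySem.Str.strip ((pvT a).getD ""))) hl ||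
              PySem.Str.isIn hl (PySem.Str.lower (PySem.Str.strip ((pvT a).getD "")))) = false := hpa
          simp only [Option.isNone_none, Bool.true_and, h2, Bool.false_eq_true, if_false,
            List.find?_cons, hpa]

theorem passCI_find (headline : String) (l : List (List (String × String)))
    (H : ∀ b ∈ l, (pvT b).isSome = true) :
    pvPassCI headline l =
      match l.find? (pvCIb (PySem.Str.lower (PySem.Str.strip headline))) with
      | some a => pvL a
      | none => none := by
  induction l with
  | nil => rfl
  | cons a rest ih =>
    obtain ⟨t, ht⟩ := Option.isSome_iff_exists.mp (H a (by simp))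
    have hgd : (pvT a).getD "" = t := by rw [ht]; rfl
    cases hci : pvCIb (PySem.Str.lower (PySem.Str.strip headline)) a with
    | true =>
      have : (PySem.Str.lower (PySem.Str.strip t) == PySem.Str.lower (PySem.Str.strip headline)) = true := by
        have := hci; unfold pvCIb at this; rw [hgd] at this; exact this
      simp only [pvPassCI, ht, this, if_true, List.find?_cons, hci]
    | false =>
      have : (PySem.Str.lower (PySem.Str.strip t) == PySem.Str.lower (PySem.Str.strip headline)) = false := by
        have := hci; unfold pvCIb at this; rw [hgd] at this; exact this
      simp only [pvPassCI, ht, this, Bool.false_eq_true, if_false, List.find?_cons, hci]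
      exact ih (fun x hx => H x (List.mem_cons_of_mem a hx))

theorem passPartial_find (headline : String) (l : List (List (String × String)))
    (H : ∀ b ∈ l, (pvT b).isSome = true) :
    pvPassPartial headline l =
      match l.find? (pvPartb (PySem.Str.lower (PySem.Str.strip headline))) with
      | some a => pvL a
      | none => none := by
  induction l with
  | nil => rfl
  | cons a rest ih =>
    obtain ⟨t, ht⟩ := Option.isSome_iff_exists.mp (H a (by simp))
    have hgd : (pvT a).getD "" = t := by rw [ht]; rfl
    cases hpa : pvPartb (PySem.Str.lower (PySem.Str.strip headline)) a with
    | true =>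
      have : (PySem.Str.isIn (PySem.Str.lower (PySem.Str.strip t)) (PySem.Str.lower (PySem.Str.strip headline)) ||
          PySem.Str.isIn (PySem.Str.lower (PySem.Str.strip headline)) (PySem.Str.lower (PySem.Str.strip t))) = true := by
        have := hpa; unfold pvPartb at this; rw [hgd] at this; exact this
      simp only [pvPassPartial, ht, this, if_true, List.find?_cons, hpa]
    | false =>
      have : (PySem.Str.isIn (PySem.Str.lower (PySem.Str.strip t)) (PySem.Str.lower (PySem.Str.strip headline)) ||
          PySem.Str.isIn (PySem.Str.lower (PySem.Str.strip headline)) (PySem.Str.lower (PySem.Str.strip t))) = false := by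
        have := hpa; unfold pvPartb at this; rw [hgd] at this; exact this
      simp only [pvPassPartial, ht, this, Bool.false_eq_true, if_false, List.find?_cons, hpa]
      exact ih (fun x hx => H x (List.mem_cons_of_mem a hx))

-- zeta-reduced form of the alt port (definitional)
theorem alt_eq (headline : String) (articles : List (List (String × String))) :
    match_headline_to_article_alt headline articles =
      (match (pvScanB (PySem.Str.strip headline) (PySem.Str.lower (PySem.Str.strip headline)) articles none none).1 with
       | some a => pvL a
       | none =>
         match (pvScanB (PySem.Str.strip headline) (PySem.Str.lower (PySem.Str.strip headline)) articles none none).2.1 with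
         | some a => pvL a
         | none =>
           match (pvScanB (PySem.Str.strip headline) (PySem.Str.lower (PySem.Str.strip headline)) articles none none).2.2 with
           | some a => pvL a
           | none => none) := rfl

-- ===== VERDICT (by name: the statement is the Claim_ definition above) =====
theorem match_headline_to_article_spec : Claim_equal_match_headline_to_article := by
  intro headline articles _ hpre
  unfold Spec_match_headline_to_article match_headline_to_article
  rw [alt_eq]
  unfold Pre_match_headline_to_article at hpre
  cases hfind : articles.find? (pvEv (PySem.Str.strip headline)) with
  | some a =>
    rw [hfind] at hpre
    simp only [Bool.and_eq_true] at hpre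
    obtain ⟨hev, l1, l2, hsplit, hpref⟩ := List.find?_eq_some_iff_append.mp hfind
    have hpref' : ∀ b ∈ l1, pvEv (PySem.Str.strip headline) b = false := by
      intro b hb; have := hpref b hb; simpa using this
    have hex : pvExb (PySem.Str.strip headline) a = true := by
      unfold pvEv at hev
      rcases Bool.or_eq_true_iff.mp hev with h | h
      · rw [hpre.1] at h; simp at h
      · exact h
    obtain ⟨lk, hlk⟩ := Option.isSome_iff_exists.mp hpre.2
    have hA : pvPassExact headline articles = pvL a := by
      rw [hsplit]; exact passExact_break headline l1 l2 a hpref' hpre.1 hex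
    have hB : (pvScanB (PySem.Str.strip headline) (PySem.Str.lower (PySem.Str.strip headline)) articles none none).1 = some a := by
      rw [hsplit]
      exact scanB_break _ _ l1 l2 a none none
        (fun b hb => by
          have := hpref' b hb
          simp only [pvEv, Bool.or_eq_false_iff] at this
          exact this.2) hex
    rw [hA, hlk]
    simp only [hB, hlk]
  | none =>
    rw [hfind] at hpre
    have H := List.find?_eq_none.mp hfind
    have H' : ∀ b ∈ articles, pvEv (PySem.Str.strip headline) b = false := by
      intro b hb; have := H b hb; simpa using this
    have HT : ∀ b ∈ articles, (pvT b).isSome = true := by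
      intro b hb; have := H' b hb
      simp only [pvEv, Bool.or_eq_false_iff, Bool.not_eq_false'] at this
      exact this.1
    have HEx : ∀ b ∈ articles, pvExb (PySem.Str.strip headline) b = false := by
      intro b hb; have := H' b hb
      simp only [pvEv, Bool.or_eq_false_iff] at this
      exact this.2
    have hA1 : pvPassExact headline articles = none := passExact_none headline articles H'
    have hB := scanB_no_exact (PySem.Str.strip headline) (PySem.Str.lower (PySem.Str.strip headline)) articles none none HEx
    rw [hA1, hB]
    simp only [Option.none_or]
    rw [passCI_find headline articles HT, passPartial_find headline articles HT]
    cases hci : articles.find? (pvCIb (PySem.Str.lower (PySem.Str.strip headline))) with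
    | some a =>
      rw [hci] at hpre
      obtain ⟨lk, hlk⟩ := Option.isSome_iff_exists.mp hpre
      simp [hlk]
    | none =>
      cases hpa : articles.find? (pvPartb (PySem.Str.lower (PySem.Str.strip headline))) with
      | some a => rfl
      | none => rfl
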